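-- pv_equiv track=rewrite | github.com/KedDEV/LightEXtractor | run.py | generate_file_patterns
-- ===== SOURCE A (Python) =====
-- def generate_file_patterns(max_depth, argument,):
--     patterns = []
--
--     for depth in range(1, max_depth + 1):
--         # Para arquivos, o argumento não deve ser seguido por /*.
--         pattern = '*/' * depth + f'{argument}'
--         patterns.append(pattern)
--
--         for sub_depth in range(1, depth + 1):
--             sub_pattern = '*/' * (depth - sub_depth) + f'{argument}'
--             patterns.append(sub_pattern)
--
--     return patterns
-- ===== SOURCE B (Python) =====
-- def generate_file_patterns(max_depth, argument,):
--     # Incremental accumulator: each depth's block is the new longest prefix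
--     # prepended to the previous block; no inner loop, no '*/'*k recomputation.
--     arg = f'{argument}'
--     patterns = []
--     block = [arg]
--     prefix = ''
--     for _ in range(max_depth):
--         prefix += '*/'
--         block = [prefix + arg] + block
--         patterns += block
--     return patterns
-- ===== Notes on version B (the rewrite author's own statement) =====
-- stated objective: alternative
-- what changed: Replaces the nested loops that recompute '*/'*k for every (depth, sub_depth) pair with a single pass carrying an incremental prefix string and the previous block forward: each depth's block is the new longest prefix prepended to the previous block, and patterns is extended with that block.
import Mathlib
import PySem

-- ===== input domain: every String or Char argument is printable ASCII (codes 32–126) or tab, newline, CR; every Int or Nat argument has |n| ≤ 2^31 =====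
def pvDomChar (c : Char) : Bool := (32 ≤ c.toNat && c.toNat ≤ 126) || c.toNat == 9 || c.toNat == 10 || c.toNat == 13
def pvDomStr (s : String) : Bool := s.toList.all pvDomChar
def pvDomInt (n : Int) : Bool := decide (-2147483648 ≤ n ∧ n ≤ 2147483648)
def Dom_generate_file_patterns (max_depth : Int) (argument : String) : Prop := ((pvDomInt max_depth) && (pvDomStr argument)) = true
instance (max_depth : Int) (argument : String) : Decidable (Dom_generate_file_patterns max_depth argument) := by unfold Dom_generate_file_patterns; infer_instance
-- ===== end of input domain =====

-- B changes the algorithm: one pass with an incremental prefix string and the previous block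
-- carried forward, instead of nested loops recomputing '*/'*k for each pair (objective: alternative).

-- ===== PORT A =====
-- Python's s * n on strings, ported by hand (exact: n ≤ 0 gives '')
def pyStrMul (s : String) (n : Int) : String := String.ofList (List.replicate n.toNat s.toList).flatten

def generate_file_patterns (max_depth : Int) (argument : String) : List String :=
  (PySem.List.pyRange 1 (max_depth + 1) 1).foldl
    (fun patterns depth =>
      let pattern := pyStrMul "*/" depth ++ argument
      let patterns := patterns ++ [pattern]
      (PySem.List.pyRange 1 (depth + 1) 1).foldl
        (fun ps sub_depth => ps ++ [pyStrMul "*/" (depth - sub_depth) ++ argument])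
        patterns)
    []

-- ===== PORT B =====
def generate_file_patterns_alt (max_depth : Int) (argument : String) : List String :=
  let arg := argument
  ((PySem.List.pyRange 0 max_depth 1).foldl
    (fun (st : List String × List String × String) (_ : Int) =>
      let pfx := st.2.2 ++ "*/"
      let block := (pfx ++ arg) :: st.2.1
      (st.1 ++ block, block, pfx))
    ([], [arg], "")).1

-- ===== PRECONDITION & SPEC =====
def Spec_generate_file_patterns (max_depth : Int) (argument : String) (out : List String) : Prop := out = generate_file_patterns_alt max_depth argument
instance (max_depth : Int) (argument : String) (out : List String) : Decidable (Spec_generate_file_patterns max_depth argument out) := by unfold Spec_generate_file_patterns; infer_instance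

-- ===== CLAIM (what is proved, stated in full; the proofs are below) =====
def Claim_equal_generate_file_patterns : Prop := ∀ (max_depth : Int) (argument : String), Dom_generate_file_patterns max_depth argument → Spec_generate_file_patterns max_depth argument (generate_file_patterns max_depth argument)

-- ===== LEMMAS AND PROOFS =====

-- repN k = '*/' * k, written with the append on the right (B's growth direction)
def repN : Nat → String
  | 0 => ""
  | k + 1 => repN k ++ "*/"

-- block after k iterations: prefixes k, k-1, …, 0, each followed by arg
def revBlock (arg : String) : Nat → List String
  | 0 => [arg]
  | k + 1 => (repN (k + 1) ++ arg) :: revBlock arg k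

-- output contributed by depths k+1 … k+m
def outSeg (arg : String) (k : Nat) : Nat → List String
  | 0 => []
  | m + 1 => revBlock arg (k + 1) ++ outSeg arg (k + 1) m

theorem pyStrMul_eq_repN (k : Nat) : pyStrMul "*/" (k : Int) = repN k := by
  induction k with
  | zero => decide
  | succ k ih =>
    have h1 : pyStrMul "*/" ((k + 1 : Nat) : Int) = "*/" ++ pyStrMul "*/" (k : Int) := by
      apply String.toList_injective
      simp [pyStrMul, List.replicate_succ]
    have h2 : ∀ j : Nat, "*/" ++ repN j = repN j ++ "*/" := by
      intro j
      induction j with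
      | zero => decide
      | succ j ihj =>
        show "*/" ++ (repN j ++ "*/") = (repN j ++ "*/") ++ "*/"
        rw [← String.append_assoc, ihj]
    rw [h1, ih, h2 k]; rfl

-- B's loop ignores the loop variable; invariant over any index list of length m
theorem B_loop (arg : String) (l : List Int) : ∀ (k : Nat) (P : List String),
    (l.foldl
      (fun (st : List String × List String × String) (_ : Int) =>
        let pfx := st.2.2 ++ "*/"
        let block := (pfx ++ arg) :: st.2.1
        (st.1 ++ block, block, pfx))
      (P, revBlock arg k, repN k)).1 = P ++ outSeg arg k l.length := by
  induction l with
  | nil => intro k P; simp [outSeg]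
  | cons x t ih =>
    intro k P
    have hstep :
        (fun (st : List String × List String × String) (_ : Int) =>
          let pfx := st.2.2 ++ "*/"
          let block := (pfx ++ arg) :: st.2.1
          (st.1 ++ block, block, pfx)) (P, revBlock arg k, repN k) x
        = (P ++ revBlock arg (k + 1), revBlock arg (k + 1), repN (k + 1)) := rfl
    simp only [List.foldl_cons, hstep, ih (k + 1), List.length_cons, outSeg, List.append_assoc]

theorem B_eq (arg : String) (n : Nat) :
    generate_file_patterns_alt (n : Int) arg = outSeg arg 0 n := by
  have h := B_loop arg (PySem.List.pyRange 0 (n : Int) 1) 0 []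
  simpa [generate_file_patterns_alt, PySem.List.length_pyRange_one] using h

-- A's per-depth contribution equals revBlock
theorem A_block (arg : String) (d : Nat) :
    (pyStrMul "*/" (d : Int) ++ arg) ::
      (PySem.List.pyRange 1 ((d : Int) + 1) 1).map
        (fun s => pyStrMul "*/" ((d : Int) - s) ++ arg)
    = revBlock arg d := by
  induction d with
  | zero =>
    have h0 : pyStrMul "*/" ((0 : Nat) : Int) = repN 0 := pyStrMul_eq_repN 0
    simp only [Nat.cast_zero] at h0 ⊢
    simp [PySem.List.pyRange_one_eq_nil, revBlock, h0, repN]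
  | succ d ih =>
    have hd1 : (((d : Nat) + 1 : Nat) : Int) = (d : Int) + 1 := by push_cast; ring
    have hcons : PySem.List.pyRange 1 ((d : Int) + 1 + 1) 1
        = 1 :: PySem.List.pyRange 2 ((d : Int) + 1 + 1) 1 :=
      PySem.List.pyRange_one_cons (by omega)
    have hshift : PySem.List.pyRange 2 ((d : Int) + 1 + 1) 1
        = (PySem.List.pyRange 1 ((d : Int) + 1) 1).map (· + 1) := by
      rw [PySem.List.pyRange_one, PySem.List.pyRange_one]
      have : ((d : Int) + 1 + 1 - 2).toNat = ((d : Int) + 1 - 1).toNat := by omega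
      rw [this, List.map_map]
      apply List.map_congr_left; intro k _; simp only [Function.comp_apply]; ring
    have hhead : pyStrMul "*/" ((d : Int) + 1) = repN (d + 1) := by
      rw [← hd1, pyStrMul_eq_repN]
    have hmap : (PySem.List.pyRange 1 ((d : Int) + 1) 1).map
          ((fun s => pyStrMul "*/" ((d : Int) + 1 - s) ++ arg) ∘ (· + 1))
        = (PySem.List.pyRange 1 ((d : Int) + 1) 1).map
          (fun s => pyStrMul "*/" ((d : Int) - s) ++ arg) := by
      apply List.map_congr_left; intro s _
      simp only [Function.comp_apply]
      congr 2; omega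
    have hfix : pyStrMul "*/" ((d : Int) + 1 - 1) = pyStrMul "*/" (d : Int) := by norm_num
    rw [hd1, hcons, List.map_cons, hshift, List.map_map, hmap, revBlock, ← ih, hhead, hfix]

-- A's whole output: flatMap of revBlock over the outer range equals outSeg
theorem A_flat (arg : String) (m : Nat) : ∀ k : Nat,
    (PySem.List.pyRange ((k : Int) + 1) ((k : Int) + (m : Int) + 1) 1).flatMap
      (fun depth => revBlock arg depth.toNat)
    = outSeg arg k m := by
  induction m with
  | zero => intro k; simp [PySem.List.pyRange_one_eq_nil, outSeg]
  | succ m ih =>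
    intro k
    have hcons : PySem.List.pyRange ((k : Int) + 1) ((k : Int) + ((m : Int) + 1) + 1) 1
        = ((k : Int) + 1) :: PySem.List.pyRange ((k : Int) + 1 + 1) ((k : Int) + ((m : Int) + 1) + 1) 1 :=
      PySem.List.pyRange_one_cons (by omega)
    have harg : ((k : Int) + 1 + 1) = (((k + 1 : Nat) : Int) + 1) := by push_cast; ring
    have harg2 : ((k : Int) + ((m : Int) + 1) + 1) = (((k + 1 : Nat) : Int) + (m : Int) + 1) := by push_cast; ring
    have htoNat : ((k : Int) + 1).toNat = k + 1 := by omega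
    rw [show ((k : Int) + (((m + 1 : Nat)) : Int) + 1) = ((k : Int) + ((m : Int) + 1) + 1) by push_cast; ring,
        hcons, List.flatMap_cons, htoNat, harg, harg2, ih (k + 1)]
    rfl

theorem A_eq (arg : String) (n : Nat) :
    generate_file_patterns (n : Int) arg = outSeg arg 0 n := by
  unfold generate_file_patterns
  have hstep : ∀ (acc : List String) (depth : Int), depth ∈ PySem.List.pyRange 1 ((n : Int) + 1) 1 →
      (fun patterns depth =>
        let pattern := pyStrMul "*/" depth ++ arg
        let patterns := patterns ++ [pattern]
        (PySem.List.pyRange 1 (depth + 1) 1).foldl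
          (fun ps sub_depth => ps ++ [pyStrMul "*/" (depth - sub_depth) ++ arg])
          patterns) acc depth
      = acc ++ revBlock arg depth.toNat := by
    intro acc depth hmem
    have h1 : 1 ≤ depth := (PySem.List.mem_pyRange_one.mp hmem).1
    have hd : depth = (depth.toNat : Int) := by omega
    simp only [PySem.List.foldl_append_singleton_eq_map, List.append_assoc,
      List.singleton_append]
    have hb := A_block arg depth.toNat
    rw [← hd] at hb
    rw [hb]
  refine Eq.trans (PySem.List.foldl_congr_mem _ _ (fun acc depth => acc ++ revBlock arg depth.toNat) _ hstep) ?_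
  rw [PySem.List.foldl_append_eq_flatMap, List.nil_append]
  have h := A_flat arg n 0
  simp only [Nat.cast_zero, zero_add] at h
  rw [h]

-- ===== VERDICT (by name: the statement is the Claim_ definition above) =====
theorem generate_file_patterns_spec : Claim_equal_generate_file_patterns := by
  intro max_depth argument _
  unfold Spec_generate_file_patterns
  by_cases h : max_depth ≤ 0
  · have hA : PySem.List.pyRange 1 (max_depth + 1) 1 = [] :=
      PySem.List.pyRange_one_eq_nil (by omega)
    have hB : PySem.List.pyRange 0 max_depth 1 = [] :=
      PySem.List.pyRange_one_eq_nil (by omega)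
    simp [generate_file_patterns, generate_file_patterns_alt, hA, hB]
  · have hd : max_depth = (max_depth.toNat : Int) := by omega
    rw [hd, A_eq, B_eq]
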